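-- pv_equiv track=rewrite | github.com/PGHM/braintrain | python/advent2017/day_22/22.py | parse_infected_nodes
-- ===== SOURCE A (Python) =====
-- from collections import namedtuple
--
-- Node = namedtuple("Node", 'x y')
--
-- def parse_infected_nodes(initial_grid, y, infected_nodes):
--     if len(initial_grid) == 0:
--         return infected_nodes
--
--     row = enumerate(initial_grid[0])
--     new_infected_nodes = [Node(x[0], y) for x in row if x[1] == '#']
--     return parse_infected_nodes(
--         initial_grid[1:],
--         y - 1,
--         infected_nodes + new_infected_nodes
--     )
-- ===== SOURCE B (Python) =====
-- from collections import namedtuple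
--
-- Node = namedtuple("Node", 'x y')
--
-- def parse_infected_nodes(initial_grid, y, infected_nodes):
--     result = list(infected_nodes)
--     for dy, row in enumerate(initial_grid):
--         for x, cell in enumerate(row):
--             if cell == '#':
--                 result.append(Node(x, y - dy))
--     return result
-- ===== Notes on version B (the rewrite author's own statement) =====
-- stated objective: faster
-- what changed: Replaced A's tail recursion (slicing the grid and concatenating a fresh per-row comprehension on each call) with a single iterative double loop over enumerate(grid)/enumerate(row) appending Node(x, y - dy) to one accumulator list.
import Mathlib
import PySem

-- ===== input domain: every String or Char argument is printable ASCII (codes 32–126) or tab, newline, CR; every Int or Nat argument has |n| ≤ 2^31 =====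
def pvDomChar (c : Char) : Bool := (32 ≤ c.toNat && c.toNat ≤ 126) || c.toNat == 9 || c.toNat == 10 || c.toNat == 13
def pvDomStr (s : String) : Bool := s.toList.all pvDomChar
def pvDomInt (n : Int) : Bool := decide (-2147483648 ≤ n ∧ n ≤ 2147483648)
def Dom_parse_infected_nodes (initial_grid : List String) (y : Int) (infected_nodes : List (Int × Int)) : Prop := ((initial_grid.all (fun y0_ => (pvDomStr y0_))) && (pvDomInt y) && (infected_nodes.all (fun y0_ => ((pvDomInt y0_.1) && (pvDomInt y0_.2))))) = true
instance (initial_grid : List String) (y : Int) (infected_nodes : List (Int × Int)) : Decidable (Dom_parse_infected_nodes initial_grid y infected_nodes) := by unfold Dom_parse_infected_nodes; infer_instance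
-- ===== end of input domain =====

-- B replaces A's tail recursion (grid slicing + list concatenation) with one iterative double loop over enumerate; return values proved equal.
-- ===== PORT A =====
def parse_infected_nodes (initial_grid : List String) (y : Int) (infected_nodes : List (Int × Int)) : List (Int × Int) :=
  match initial_grid with
  | [] => infected_nodes
  | row :: rest =>
    let r := PySem.List.enumerate row.toList 0
    let new_infected_nodes := (r.filter (fun x => x.2 == '#')).map (fun x => (x.1, y))
    parse_infected_nodes rest (y - 1) (infected_nodes ++ new_infected_nodes)

-- ===== PORT B =====
def parse_infected_nodes_alt (initial_grid : List String) (y : Int) (infected_nodes : List (Int × Int)) : List (Int × Int) :=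
  (PySem.List.enumerate initial_grid 0).foldl (fun result p =>
    (PySem.List.enumerate p.2.toList 0).foldl (fun result q =>
      if q.2 == '#' then result ++ [(q.1, y - p.1)] else result) result) infected_nodes

-- ===== PRECONDITION & SPEC =====
def Spec_parse_infected_nodes (initial_grid : List String) (y : Int) (infected_nodes : List (Int × Int)) (out : List (Int × Int)) : Prop := out = parse_infected_nodes_alt initial_grid y infected_nodes
instance (initial_grid : List String) (y : Int) (infected_nodes : List (Int × Int)) (out : List (Int × Int)) : Decidable (Spec_parse_infected_nodes initial_grid y infected_nodes out) := by unfold Spec_parse_infected_nodes; infer_instance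

-- ===== CLAIM (what is proved, stated in full; the proofs are below) =====
def Claim_equal_parse_infected_nodes : Prop := ∀ (initial_grid : List String) (y : Int) (infected_nodes : List (Int × Int)), Dom_parse_infected_nodes initial_grid y infected_nodes → Spec_parse_infected_nodes initial_grid y infected_nodes (parse_infected_nodes initial_grid y infected_nodes)

-- ===== LEMMAS AND PROOFS =====

-- the double loop started at row index s computes A's result at base row y - s
lemma pv_alt_go (g : List String) : ∀ (y s : Int) (inf : List (Int × Int)),
    (PySem.List.enumerate g s).foldl (fun result p =>
      (PySem.List.enumerate p.2.toList 0).foldl (fun result q =>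
        if q.2 == '#' then result ++ [(q.1, y - p.1)] else result) result) inf
    = parse_infected_nodes g (y - s) inf := by
  induction g with
  | nil => intro y s inf; simp [PySem.List.enumerate, parse_infected_nodes]
  | cons row rest ih =>
    intro y s inf
    rw [PySem.List.enumerate_cons]
    simp only [List.foldl_cons]
    rw [PySem.List.foldl_append_if, ih y (s + 1)]
    have h : y - (s + 1) = y - s - 1 := by ring
    rw [h]
    rfl

-- ===== VERDICT (by name: the statement is the Claim_ definition above) =====
theorem parse_infected_nodes_spec : Claim_equal_parse_infected_nodes := by
  intro g y inf _
  unfold Spec_parse_infected_nodes parse_infected_nodes_alt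
  rw [pv_alt_go g y 0 inf]
  simp
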